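-- pv_equiv track=rewrite | github.com/siegelzero/rosemary | combinatorics/partitions.py | restricted_partitions_gen
-- ===== SOURCE A (Python) =====
-- def restricted_partitions_gen(n, parts = None):
--     """
--     restricted_partitions_gen(n, parts):
--     Given a positive integer n, this function returns a generator over all
--     partitions of n using parts from the list parts.
--
--     Examples:
--     >>> L = restricted_partitions(4)
--     >>> list(L)
--     [[1, 1, 1, 1], [2, 1, 1], [2, 2], [3, 1], [4]]
--     >>> L = restricted_partitions(10, [2, 3, 5, 7])
--     >>> list(L)
--     [[2, 2, 2, 2, 2], [3, 3, 2, 2], [5, 3, 2], [5, 5], [7, 3]]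
--     """
--     if parts is None:
--         parts = range(1, n + 1)
--     else:
--         parts.sort()
--
--     so_far = []
--     S = {}
--     S[1] = parts[:]
--     k = 1
--
--     while k > 0:
--         while S[k]:
--             # pick the next element in the stack
--             x = S[k].pop()
--
--             # append this element onto the current partial solution
--             so_far.append(x)
--
--             # check that the new config is still a partial solution
--             t_sum = sum(so_far)
--             if t_sum == n:
--                 yield so_far[:]
--                 #good.append(so_far[:])
--
--             k += 1
--             S[k] = []
--             for t in parts:
--                 if t > x:
--                     break
--                 if t_sum + t <= n:
--                     S[k].append(t)
--
--         if so_far: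
--             so_far.pop()
--         k -= 1
-- ===== SOURCE B (Python) =====
-- # Recursive-generator re-implementation: DFS on the call stack instead of A's
-- # explicit S[k] stack machine.  Like A, it sorts a given parts list in place
-- # (deferred to the first next(), since the setup sits in the generator body).
-- def restricted_partitions_gen(n, parts=None):
--     if parts is None:
--         parts = range(1, n + 1)
--     else:
--         parts.sort()
--
--     def rec(so_far, t_sum, bound):
--         for t in reversed([t for t in parts if t <= bound and t_sum + t <= n]):
--             so_far.append(t)
--             if t_sum + t == n:
--                 yield so_far[:]
--             yield from rec(so_far, t_sum + t, t)
--             so_far.pop()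
--
--     for x in reversed(list(parts)):
--         if x == n:
--             yield [x]
--         yield from rec([x], x, x)
-- ===== Notes on version B (the rewrite author's own statement) =====
-- stated objective: alternative
-- what changed: A's explicit stack machine (dict S of per-level candidate lists, while-loops, recomputed sum(so_far)) is replaced by a recursive generator that does the same largest-first DFS on the call stack, carrying the running sum and bound as arguments.
-- outside the precondition, e.g. on restricted_partitions_gen(-3, [-1]): A returns [], B returns []
import Mathlib
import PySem

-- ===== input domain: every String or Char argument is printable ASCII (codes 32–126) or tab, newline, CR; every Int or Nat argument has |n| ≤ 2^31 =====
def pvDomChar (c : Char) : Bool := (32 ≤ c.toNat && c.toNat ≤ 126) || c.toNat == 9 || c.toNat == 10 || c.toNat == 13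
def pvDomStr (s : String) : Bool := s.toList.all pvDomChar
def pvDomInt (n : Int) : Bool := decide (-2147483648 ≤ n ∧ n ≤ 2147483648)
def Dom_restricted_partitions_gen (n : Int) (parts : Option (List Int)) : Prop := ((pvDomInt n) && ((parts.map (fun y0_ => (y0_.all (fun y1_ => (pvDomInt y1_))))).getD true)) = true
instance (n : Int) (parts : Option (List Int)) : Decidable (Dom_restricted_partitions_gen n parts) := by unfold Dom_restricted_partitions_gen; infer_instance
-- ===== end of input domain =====

-- B replaces A's explicit S[k] stack machine by a recursive DFS generator; A (and B) sort a
-- given parts list in place, the equivalence proved here is about the sequence of yielded values.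

-- ===== PORT A =====
-- shared setup: parts = range(1, n+1) if None else sorted parts (both Pythons run the same setup)
def pvParts (n : Int) (parts : Option (List Int)) : List Int :=
  match parts with
  | none => PySem.List.pyRange 1 (n + 1) 1
  | some l => PySem.List.sorted l id false

-- 'for t in parts: if t > x: break; if t_sum + t <= n: S[k].append(t)'
def pvChildLoop (ps : List Int) (x tsum n : Int) : List Int :=
  match ps with
  | [] => []
  | t :: r => if x < t then [] else (if tsum + t ≤ n then [t] else []) ++ pvChildLoop r x tsum n

-- fuel bound for the while-loops (totality guard only; proved sufficient on Pre_)
def pvBnd (P : Nat) : Nat → Nat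
  | 0 => 1
  | d + 1 => 1 + P * (1 + pvBnd P d)

-- A's while-machine: soFar, the stack S[1..k] (head = level k), and the accumulated yields
def pvRunA (n : Int) (ps : List Int) : Nat → List Int → List (List Int) → List (List Int) → List (List Int)
  | 0, _, _, acc => acc
  | _ + 1, _, [], acc => acc
  | f + 1, soFar, lvl :: rest, acc =>
    match lvl.getLast? with
    | some x =>
      let soFar' := soFar ++ [x]
      let tsum := soFar'.sum
      pvRunA n ps f soFar' (pvChildLoop ps x tsum n :: lvl.dropLast :: rest)
        (if tsum = n then acc ++ [soFar'] else acc)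
    | none => pvRunA n ps f soFar.dropLast rest acc

def restricted_partitions_gen (n : Int) (parts : Option (List Int)) : List (List Int) :=
  let ps := pvParts n parts
  pvRunA n ps (pvBnd ps.length (n.toNat + 1) + 1) [] [ps] []

-- ===== PORT B =====
-- '[t for t in parts if t <= bound and t_sum + t <= n]'
def pvCand (n : Int) (ps : List Int) (s b : Int) : List Int :=
  ps.filter (fun t => decide (t ≤ b) && decide (s + t ≤ n))

-- the recursive generator rec(so_far, t_sum, bound); fuel is a totality guard only
def pvRecB (n : Int) (ps : List Int) : Nat → List Int → Int → Int → List (List Int)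
  | 0, _, _, _ => []
  | f + 1, pre, s, b =>
    ((pvCand n ps s b).reverse).flatMap (fun t =>
      (if s + t = n then [pre ++ [t]] else []) ++ pvRecB n ps f (pre ++ [t]) (s + t) t)

def restricted_partitions_gen_alt (n : Int) (parts : Option (List Int)) : List (List Int) :=
  let ps := pvParts n parts
  ps.reverse.flatMap (fun x => (if x = n then [[x]] else []) ++ pvRecB n ps n.toNat [x] x x)

-- ===== PRECONDITION & SPEC =====
-- Pre_ excludes (i) parts=None with n ≥ 1, where A raises AttributeError (range has no .pop),
-- and (ii) parts lists containing a nonpositive entry, with which A's loop can run forever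
-- (on the remaining nonpositive-part inputs A happens to terminate, but the same quirk governs them).
def Pre_restricted_partitions_gen (n : Int) (parts : Option (List Int)) : Prop :=
  (parts = none → n ≤ 0) ∧ ∀ t ∈ parts.getD [], 1 ≤ t
instance (n : Int) (parts : Option (List Int)) : Decidable (Pre_restricted_partitions_gen n parts) := by
  unfold Pre_restricted_partitions_gen; infer_instance

def pvWitness_restricted_partitions_gen : Int × Option (List Int) := (6, some [2, 3])

def Spec_restricted_partitions_gen (n : Int) (parts : Option (List Int)) (out : List (List Int)) : Prop := out = restricted_partitions_gen_alt n parts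
instance (n : Int) (parts : Option (List Int)) (out : List (List Int)) : Decidable (Spec_restricted_partitions_gen n parts out) := by unfold Spec_restricted_partitions_gen; infer_instance

-- ===== CLAIM (what is proved, stated in full; the proofs are below) =====
def Claim_equal_restricted_partitions_gen : Prop := ∀ (n : Int) (parts : Option (List Int)), Dom_restricted_partitions_gen n parts → Pre_restricted_partitions_gen n parts → Spec_restricted_partitions_gen n parts (restricted_partitions_gen n parts)

-- ===== LEMMAS AND PROOFS =====

-- B-side semantics of one level of A's machine, each subtree run with its canonical fuel
def pvProc (n : Int) (ps : List Int) (pre : List Int) (L : List Int) : List (List Int) :=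
  L.reverse.flatMap (fun x =>
    (if pre.sum + x = n then [pre ++ [x]] else []) ++
      pvRecB n ps ((n - (pre.sum + x)).toNat) (pre ++ [x]) (pre.sum + x) x)

lemma flatMap_congr' {α β : Type} {l : List α} {f g : α → List β}
    (h : ∀ a ∈ l, f a = g a) : l.flatMap f = l.flatMap g := by
  induction l with
  | nil => rfl
  | cons a t ih => simp only [List.flatMap_cons, h a (by simp), ih (fun a ha => h a (by simp [ha]))]

lemma pvParts_sorted (n : Int) (parts : Option (List Int)) :
    (pvParts n parts).Pairwise (· ≤ ·) := by
  unfold pvParts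
  cases parts with
  | none => exact (PySem.List.pairwise_lt_pyRange_one 1 (n+1)).imp (fun h => le_of_lt h)
  | some l => exact PySem.List.sorted_pairwise l id

lemma pvParts_pos (n : Int) (parts : Option (List Int))
    (hpre : Pre_restricted_partitions_gen n parts) :
    ∀ t ∈ pvParts n parts, 1 ≤ t := by
  unfold pvParts
  cases parts with
  | none =>
    intro t ht
    rw [PySem.List.mem_pyRange_one] at ht
    exact ht.1
  | some l =>
    intro t ht
    rw [PySem.List.mem_sorted] at ht
    exact hpre.2 t ht

lemma childLoop_eq_cand (n : Int) (ps : List Int) (x s : Int)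
    (hs : ps.Pairwise (· ≤ ·)) :
    pvChildLoop ps x s n = pvCand n ps s x := by
  induction ps with
  | nil => rfl
  | cons t r ih =>
    rcases List.pairwise_cons.mp hs with ⟨hle, hr⟩
    unfold pvChildLoop pvCand
    by_cases hxt : x < t
    · simp only [if_pos hxt]
      have : ∀ u ∈ t :: r, ¬ ((decide (u ≤ x) && decide (s + u ≤ n)) = true) := by
        intro u hu
        rcases List.mem_cons.mp hu with h | h
        · subst h; simp; intro h'; omega
        · have := hle u h; simp; intro h'; omega
      rw [List.filter_eq_nil_iff.mpr this]
    · simp only [if_neg hxt]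
      have htx : t ≤ x := by omega
      by_cases hsn : s + t ≤ n
      · simp [htx, hsn, ih hr, pvCand]
      · simp [htx, hsn, ih hr, pvCand]

-- if nothing can still be added (n - s ≤ 0), there are no candidates
lemma cand_nil (n : Int) (ps : List Int) (s b : Int)
    (hp : ∀ t ∈ ps, 1 ≤ t) (h : (n - s).toNat = 0) :
    pvCand n ps s b = [] := by
  apply List.filter_eq_nil_iff.mpr
  intro t ht
  have := hp t ht
  simp
  intro h'
  omega

lemma recB_stable (n : Int) (ps : List Int) (hp : ∀ t ∈ ps, 1 ≤ t) :
    ∀ (k f₁ f₂ : Nat) (pre : List Int) (s b : Int),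
      (n - s).toNat ≤ k → (n - s).toNat ≤ f₁ → (n - s).toNat ≤ f₂ →
      pvRecB n ps f₁ pre s b = pvRecB n ps f₂ pre s b := by
  intro k
  induction k with
  | zero =>
    intro f₁ f₂ pre s b hk h1 h2
    have hc := cand_nil n ps s b hp (by omega)
    cases f₁ <;> cases f₂ <;> simp [pvRecB, hc]
  | succ k ih =>
    intro f₁ f₂ pre s b hk h1 h2
    by_cases hz : (n - s).toNat = 0
    · have hc := cand_nil n ps s b hp hz
      cases f₁ <;> cases f₂ <;> simp [pvRecB, hc]
    · obtain ⟨f₁', rfl⟩ : ∃ m, f₁ = m + 1 := ⟨f₁ - 1, by omega⟩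
      obtain ⟨f₂', rfl⟩ : ∃ m, f₂ = m + 1 := ⟨f₂ - 1, by omega⟩
      simp only [pvRecB]
      apply flatMap_congr'
      intro t ht
      rw [List.mem_reverse] at ht
      have htps := List.mem_filter.mp ht
      have ht1 : 1 ≤ t := hp t htps.1
      have hcond := htps.2
      simp at hcond
      have hst : (n - (s + t)).toNat ≤ k ∧ (n - (s + t)).toNat ≤ f₁' ∧ (n - (s + t)).toNat ≤ f₂' := by
        omega
      rw [ih f₁' f₂' (pre ++ [t]) (s + t) t hst.1 hst.2.1 hst.2.2]

lemma recB_eq_proc (n : Int) (ps : List Int) (hp : ∀ t ∈ ps, 1 ≤ t)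
    (pre : List Int) (b : Int) :
    pvRecB n ps ((n - (pre.sum)).toNat) pre pre.sum b =
      pvProc n ps pre (pvCand n ps pre.sum b) := by
  unfold pvProc
  rcases h : (n - pre.sum).toNat with _ | m
  · rw [cand_nil n ps pre.sum b hp h]
    rfl
  · simp only [pvRecB]
    apply flatMap_congr'
    intro t ht
    rw [List.mem_reverse] at ht
    have htf := List.mem_filter.mp ht
    have ht1 : 1 ≤ t := hp t htf.1
    have hcond := htf.2
    simp at hcond
    congr 1
    apply recB_stable n ps hp m
    · omega
    · omega
    · omega

lemma runA_emptyStack (n : Int) (ps : List Int) (f : Nat) (pre : List Int) (acc : List (List Int)) :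
    pvRunA n ps f pre [] acc = acc := by
  cases f <;> rfl

lemma runA_succ_nilLvl (n : Int) (ps : List Int) (f : Nat) (pre : List Int)
    (rest acc : List (List Int)) :
    pvRunA n ps (f + 1) pre ([] :: rest) acc = pvRunA n ps f pre.dropLast rest acc := by
  rfl

lemma runA_succ_concat (n : Int) (ps : List Int) (f : Nat) (pre M : List Int) (x : Int)
    (rest acc : List (List Int)) :
    pvRunA n ps (f + 1) pre ((M ++ [x]) :: rest) acc =
      pvRunA n ps f (pre ++ [x])
        (pvChildLoop ps x ((pre ++ [x]).sum) n :: M :: rest)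
        (if (pre ++ [x]).sum = n then acc ++ [pre ++ [x]] else acc) := by
  simp [pvRunA]

lemma segAux (n : Int) (ps : List Int)
    (hs : ps.Pairwise (· ≤ ·)) (hp : ∀ t ∈ ps, 1 ≤ t) :
    ∀ (d : Nat) (L pre : List Int),
      (∀ x ∈ L, 1 ≤ x ∧ (n - (pre.sum + x)).toNat < d) →
      ∃ f ≤ 1 + L.length * (1 + pvBnd ps.length (d - 1)),
        ∀ (g : Nat) (rest acc : List (List Int)),
          pvRunA n ps (f + g) pre (L :: rest) acc =
            pvRunA n ps g pre.dropLast rest (acc ++ pvProc n ps pre L) := by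
  intro d
  induction d with
  | zero =>
    intro L pre hmem
    have hL : L = [] := by
      cases L with
      | nil => rfl
      | cons y t => exact absurd (hmem y (by simp)).2 (by omega)
    subst hL
    refine ⟨1, by simp, ?_⟩
    intro g rest acc
    rw [Nat.add_comm, runA_succ_nilLvl]
    simp [pvProc]
  | succ e IH =>
    intro L pre
    induction L using List.reverseRecOn with
    | nil =>
      intro _
      refine ⟨1, by simp, ?_⟩
      intro g rest acc
      rw [Nat.add_comm, runA_succ_nilLvl]
      simp [pvProc]
    | append_singleton M x ihM =>
      intro hmem
      obtain ⟨fm, hfm, hM⟩ := ihM (fun y hy => hmem y (by simp [hy]))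
      have hx := hmem x (by simp)
      have hsum : (pre ++ [x]).sum = pre.sum + x := by simp
      have hchild : pvChildLoop ps x ((pre ++ [x]).sum) n
          = pvCand n ps ((pre ++ [x]).sum) x := childLoop_eq_cand n ps x _ hs
      have hchmem : ∀ t ∈ pvCand n ps ((pre ++ [x]).sum) x,
          1 ≤ t ∧ (n - ((pre ++ [x]).sum + t)).toNat < e := by
        intro t ht
        have htf := List.mem_filter.mp ht
        have ht1 : 1 ≤ t := hp t htf.1
        have hcond := htf.2
        simp at hcond
        have hx2 := hx.2
        rw [hsum] at *
        exact ⟨ht1, by omega⟩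
      obtain ⟨fc, hfc, hC⟩ := IH (pvCand n ps ((pre ++ [x]).sum) x) (pre ++ [x]) hchmem
      have hfc' : fc ≤ pvBnd ps.length e := by
        cases e with
        | zero =>
          have hnil : pvCand n ps ((pre ++ [x]).sum) x = [] := by
            rcases h' : pvCand n ps ((pre ++ [x]).sum) x with _ | ⟨y, t⟩
            · rfl
            · exact absurd (hchmem y (by rw [h']; simp)).2 (by omega)
          rw [hnil] at hfc
          simpa [pvBnd] using hfc
        | succ e' =>
          have hlen : (pvCand n ps ((pre ++ [x]).sum) x).length ≤ ps.length :=
            List.length_filter_le _ _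
          have h1 : (e' + 1) - 1 = e' := rfl
          rw [h1] at hfc
          have hmono : (pvCand n ps ((pre ++ [x]).sum) x).length * (1 + pvBnd ps.length e')
              ≤ ps.length * (1 + pvBnd ps.length e') := Nat.mul_le_mul_right _ hlen
          have hexp : pvBnd ps.length (e' + 1) = 1 + ps.length * (1 + pvBnd ps.length e') := rfl
          rw [hexp]
          generalize (pvCand n ps ((pre ++ [x]).sum) x).length * (1 + pvBnd ps.length e') = A at hfc hmono
          generalize ps.length * (1 + pvBnd ps.length e') = B at hmono ⊢
          omega
      refine ⟨fc + fm + 1, ?_, ?_⟩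
      · have hlx : (M ++ [x]).length = M.length + 1 := by simp
        rw [hlx, Nat.succ_mul]
        have h1 : (e + 1) - 1 = e := rfl
        rw [h1] at hfm ⊢
        generalize M.length * (1 + pvBnd ps.length e) = A at hfm ⊢
        omega
      · intro g rest acc
        have h1 : fc + fm + 1 + g = (fc + (fm + g)) + 1 := by omega
        rw [h1, runA_succ_concat, hchild,
            hC (fm + g) (M :: rest)
              (if (pre ++ [x]).sum = n then acc ++ [pre ++ [x]] else acc),
            List.dropLast_concat, hM g rest]
        congr 1
        have hrec := recB_eq_proc n ps hp (pre ++ [x]) x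
        rw [hsum] at hrec
        have hrev : (M ++ [x]).reverse = x :: M.reverse := by simp
        simp only [pvProc, hrev, List.flatMap_cons, hsum] at *
        rw [← hrec]
        split_ifs <;> simp [List.append_assoc]

theorem restricted_partitions_gen_spec : Claim_equal_restricted_partitions_gen := by
  intro n parts _ hpre
  unfold Spec_restricted_partitions_gen restricted_partitions_gen restricted_partitions_gen_alt
  have hs := pvParts_sorted n parts
  have hp := pvParts_pos n parts hpre
  set ps := pvParts n parts with hps
  obtain ⟨f, hf, hrun⟩ := segAux n ps hs hp (n.toNat + 1) ps []
    (fun x hx => ⟨hp x hx, by have := hp x hx; simp; omega⟩)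
  have hf' : f ≤ pvBnd ps.length (n.toNat + 1) := by
    have h1 : (n.toNat + 1) - 1 = n.toNat := rfl
    rw [h1] at hf
    have hexp : pvBnd ps.length (n.toNat + 1) = 1 + ps.length * (1 + pvBnd ps.length n.toNat) := rfl
    rw [hexp]
    generalize ps.length * (1 + pvBnd ps.length n.toNat) = A at hf ⊢
    omega
  have hg : pvBnd ps.length (n.toNat + 1) + 1 = f + (pvBnd ps.length (n.toNat + 1) + 1 - f) := by
    omega
  simp only []
  show pvRunA n ps (pvBnd ps.length (n.toNat + 1) + 1) [] [ps] []
    = List.flatMap (fun x => (if x = n then [[x]] else []) ++ pvRecB n ps n.toNat [x] x x) ps.reverse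
  rw [hg, hrun (pvBnd ps.length (n.toNat + 1) + 1 - f) [] [], runA_emptyStack]
  simp only [List.nil_append]
  unfold pvProc
  apply flatMap_congr'
  intro x hx
  rw [List.mem_reverse] at hx
  have hx1 : 1 ≤ x := hp x hx
  simp only [List.sum_nil, List.nil_append, Int.zero_add]
  congr 1
  apply recB_stable n ps hp n.toNat
  · omega
  · omega
  · omega
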